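-- pv_equiv track=rewrite | github.com/Arsen1302/Code-copy-detector | TestData/solutions/problem_1703_2.py | solution_1703_2
-- ===== SOURCE A (Python) =====
-- def solution_1703_2(queries, dictionary):
--     n, ans = len(queries[0]), []
--
--     for i in queries:
--         for j in dictionary:
--             if sum(i[k] != j[k] for k in range(n)) < 3:
--                 ans.append(i)
--                 break
--
--     return ans
-- ===== SOURCE B (Python) =====
-- def solution_1703_2(queries, dictionary):
--     n = len(queries[0])
--     masks = [()] + [(p,) for p in range(n)] + [(p, q) for p in range(n) for q in range(n) if p < q]
--
--     def sigs(word):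
--         prefix = word[:n]
--         return {(m, ''.join('*' if k in m else prefix[k] for k in range(n))) for m in masks}
--
--     dict_sigs = set()
--     for w in dictionary:
--         dict_sigs.update(sigs(w))
--
--     return [q for q in queries if not sigs(q).isdisjoint(dict_sigs)]
-- ===== Notes on version B (the rewrite author's own statement) =====
-- stated objective: alternative
-- what changed: Replaces the per-query scan of the whole dictionary with distance counting (O(Q*D*n)) by wildcard-pair signature hashing: every word contributes all O(n^2) masked signatures (up to two positions wildcarded) to a hash set built once from the dictionary, and a query matches iff one of its own signatures is in that set.
-- outside the precondition, e.g. on solution_1703_2(['ab'], ['ab', 'x']): A returns ['ab'], B raises IndexError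
import Mathlib
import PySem

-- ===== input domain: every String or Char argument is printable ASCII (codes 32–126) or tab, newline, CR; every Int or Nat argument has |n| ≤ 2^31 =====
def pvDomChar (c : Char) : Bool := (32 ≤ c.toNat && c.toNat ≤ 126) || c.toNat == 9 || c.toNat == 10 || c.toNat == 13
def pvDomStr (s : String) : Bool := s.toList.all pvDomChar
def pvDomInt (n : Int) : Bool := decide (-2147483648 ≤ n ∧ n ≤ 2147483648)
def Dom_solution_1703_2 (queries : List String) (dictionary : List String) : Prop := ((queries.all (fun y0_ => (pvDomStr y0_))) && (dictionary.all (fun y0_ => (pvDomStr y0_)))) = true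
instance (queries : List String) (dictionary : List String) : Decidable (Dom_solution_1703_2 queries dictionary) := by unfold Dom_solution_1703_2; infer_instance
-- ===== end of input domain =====

-- B replaces A's per-query dictionary scan with wildcard-signature hashing (all masks of ≤2 positions): a genuinely different algorithm (objective: alternative), not measured faster.


-- ===== PORT A =====
-- sum(i[k] != j[k] for k in range(n)) — exact under Pre_ (all indices in range, so getD never hits its default)
def pvMismLT3 (n : Nat) (a b : List Char) : Bool :=
  decide ((List.range n).countP (fun k => decide (a.getD k ' ' ≠ b.getD k ' ')) < 3)

def solution_1703_2 (queries : List String) (dictionary : List String) : List String :=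
  let n := (queries.head?.getD "").toList.length   -- len(queries[0]); Pre_ excludes queries = []
  queries.foldl (fun ans i =>
    if dictionary.any (fun j => pvMismLT3 n i.toList j.toList) then ans ++ [i] else ans) []

-- ===== PORT B =====
-- ''.join('*' if k in m else prefix[k] for k in range(n)) — exact under Pre_ (prefix has length n)
def pvMaskWord (n : Nat) (m : List Nat) (pre : List Char) : List Char :=
  (List.range n).map (fun k => if k ∈ m then '*' else pre.getD k ' ')

def pvMasks (n : Nat) : List (List Nat) :=
  [[]] ++ (List.range n).map (fun p => [p])
    ++ (List.range n).flatMap (fun p =>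
         ((List.range n).filter (fun q => decide (p < q))).map (fun q => [p, q]))

def pvSigs (n : Nat) (word : List Char) : PySem.Set (List Nat × List Char) :=
  PySem.Set.ofList ((pvMasks n).map (fun m => (m, pvMaskWord n m (word.take n))))

def solution_1703_2_alt (queries : List String) (dictionary : List String) : List String :=
  let n := (queries.head?.getD "").toList.length   -- len(queries[0]); Pre_ excludes queries = []
  let dictSigs := dictionary.foldl (fun s w => PySem.Set.update s (pvSigs n w.toList)) PySem.Set.empty
  queries.filter (fun q => !(PySem.Set.isdisjoint (pvSigs n q.toList) dictSigs))

-- ===== PRECONDITION & SPEC =====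
-- Pre_ excludes empty queries (both programs raise IndexError on len(queries[0])) and inputs containing a
-- word shorter than len(queries[0]): indexing such a word raises IndexError in both programs, except that A
-- returns when an early break skips the short dictionary word, while B (which signatures every word) raises.
def Pre_solution_1703_2 (queries : List String) (dictionary : List String) : Prop :=
  queries ≠ [] ∧
    ∀ w ∈ queries ++ dictionary, (queries.head?.getD "").toList.length ≤ w.toList.length
instance (queries : List String) (dictionary : List String) : Decidable (Pre_solution_1703_2 queries dictionary) := by unfold Pre_solution_1703_2; infer_instance

def pvWitness_solution_1703_2 : List String × List String := (["abc", "xbc"], ["abd", "zzz"])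

def Spec_solution_1703_2 (queries : List String) (dictionary : List String) (out : List String) : Prop := out = solution_1703_2_alt queries dictionary
instance (queries : List String) (dictionary : List String) (out : List String) : Decidable (Spec_solution_1703_2 queries dictionary out) := by unfold Spec_solution_1703_2; infer_instance

-- ===== CLAIM (what is proved, stated in full; the proofs are below) =====
def Claim_equal_solution_1703_2 : Prop := ∀ (queries : List String) (dictionary : List String), Dom_solution_1703_2 queries dictionary → Pre_solution_1703_2 queries dictionary → Spec_solution_1703_2 queries dictionary (solution_1703_2 queries dictionary)

-- ===== LEMMAS AND PROOFS =====

-- mask equality on two length-≥-n words says exactly: they agree on every unmasked position < n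
theorem pvMaskWord_eq_iff (n : Nat) (m : List Nat) (a b : List Char) :
    pvMaskWord n m a = pvMaskWord n m b ↔
      ∀ k < n, k ∉ m → a.getD k ' ' = b.getD k ' ' := by
  unfold pvMaskWord
  rw [List.map_inj_left]
  constructor
  · intro h k hk hkm
    have := h k (List.mem_range.mpr hk)
    simpa [hkm] using this
  · intro h k hk
    by_cases hkm : k ∈ m
    · simp [hkm]
    · simpa [hkm, List.getD] using h k (List.mem_range.mp hk) hkm

-- membership structure of pvMasks
theorem mem_pvMasks (n : Nat) (m : List Nat) :
    m ∈ pvMasks n ↔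
      m = [] ∨ (∃ p, p < n ∧ m = [p]) ∨ (∃ p q, p < q ∧ q < n ∧ m = [p, q]) := by
  unfold pvMasks
  simp only [List.mem_append, List.mem_map, List.mem_flatMap, List.mem_filter, List.mem_range,
    List.mem_cons, List.not_mem_nil, or_false]
  constructor
  · rintro ((h | ⟨p, hp, rfl⟩) | ⟨p, hp, q, ⟨hq, hpq⟩, rfl⟩)
    · exact Or.inl h
    · exact Or.inr (Or.inl ⟨p, hp, rfl⟩)
    · exact Or.inr (Or.inr ⟨p, q, by simpa using hpq, hq, rfl⟩)
  · rintro (rfl | ⟨p, hp, rfl⟩ | ⟨p, q, hpq, hq, rfl⟩)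
    · exact Or.inl (Or.inl rfl)
    · exact Or.inl (Or.inr ⟨p, hp, rfl⟩)
    · exact Or.inr ⟨p, lt_trans hpq hq, q, ⟨hq, by simpa using hpq⟩, rfl⟩

-- a strictly increasing list of length < 3 with entries < n is one of the masks
theorem short_sorted_mem_pvMasks (n : Nat) (l : List Nat) (hpw : l.Pairwise (· < ·))
    (hlen : l.length < 3) (hlt : ∀ k ∈ l, k < n) : l ∈ pvMasks n := by
  match l with
  | [] => exact (mem_pvMasks n []).mpr (Or.inl rfl)
  | [x] => exact (mem_pvMasks n _).mpr (Or.inr (Or.inl ⟨x, hlt x (by simp), rfl⟩))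
  | [x, y] =>
    have hxy : x < y := by simpa using List.rel_of_pairwise_cons hpw (by simp)
    exact (mem_pvMasks n _).mpr (Or.inr (Or.inr ⟨x, y, hxy, hlt y (by simp), rfl⟩))
  | x :: y :: z :: t => simp at hlen; omega

-- the core equivalence: Hamming distance on the first n positions < 3 ↔ some ≤2-mask makes the words equal
theorem pvMism_iff_mask (n : Nat) (a b : List Char) :
    ((List.range n).countP (fun k => decide (a.getD k ' ' ≠ b.getD k ' ')) < 3) ↔
      ∃ m ∈ pvMasks n, pvMaskWord n m a = pvMaskWord n m b := by
  constructor
  · intro h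
    have hlen : ((List.range n).filter (fun k => decide (a.getD k ' ' ≠ b.getD k ' '))).length < 3 := by
      rw [← List.countP_eq_length_filter]; exact h
    have hpw : ((List.range n).filter (fun k => decide (a.getD k ' ' ≠ b.getD k ' '))).Pairwise (· < ·) :=
      (List.pairwise_lt_range (n := n)).filter _
    have hsub : ∀ k ∈ (List.range n).filter (fun k => decide (a.getD k ' ' ≠ b.getD k ' ')), k < n := by
      intro k hk
      exact List.mem_range.mp (List.mem_filter.mp hk).1
    refine ⟨(List.range n).filter (fun k => decide (a.getD k ' ' ≠ b.getD k ' ')),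
      short_sorted_mem_pvMasks n _ hpw hlen hsub, ?_⟩
    rw [pvMaskWord_eq_iff]
    intro k hk hkm
    by_contra hne
    exact hkm (List.mem_filter.mpr ⟨List.mem_range.mpr hk, by simpa [List.getD] using hne⟩)
  · rintro ⟨m, hmem, heq⟩
    rw [pvMaskWord_eq_iff] at heq
    have hsub : ∀ k, k < n → a.getD k ' ' ≠ b.getD k ' ' → k ∈ m := by
      intro k hk hne
      by_contra hkm
      exact hne (heq k hk hkm)
    have hcnt : (List.range n).countP (fun k => decide (a.getD k ' ' ≠ b.getD k ' ')) ≤ m.length := by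
      rw [List.countP_eq_length_filter]
      have hnd : ((List.range n).filter (fun k => decide (a.getD k ' ' ≠ b.getD k ' '))).Nodup :=
        (List.nodup_range).filter _
      have hss : ((List.range n).filter (fun k => decide (a.getD k ' ' ≠ b.getD k ' '))) ⊆ m := by
        intro k hk
        have := List.mem_filter.mp hk
        exact hsub k (List.mem_range.mp this.1) (by simpa using this.2)
      calc ((List.range n).filter _).length
          = ((List.range n).filter _).toFinset.card := (List.toFinset_card_of_nodup hnd).symm
        _ ≤ m.toFinset.card := Finset.card_le_card (fun x hx => List.mem_toFinset.mpr (hss (List.mem_toFinset.mp hx)))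
        _ ≤ m.length := m.toFinset_card_le
    have hm2 : m.length ≤ 2 := by
      rcases (mem_pvMasks n m).mp hmem with rfl | ⟨p, _, rfl⟩ | ⟨p, q, _, _, rfl⟩ <;> simp
    omega

-- membership in the folded dictionary signature set
theorem mem_dictSigs (dictionary : List String) (n : Nat)
    (y : List Nat × List Char) (s : PySem.Set (List Nat × List Char)) :
    y ∈ dictionary.foldl (fun s w => PySem.Set.update s (pvSigs n w.toList)) s ↔
      y ∈ s ∨ ∃ w ∈ dictionary, y ∈ pvSigs n w.toList := by
  induction dictionary generalizing s with
  | nil => simp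
  | cons w ws ih =>
    simp only [List.foldl_cons, ih, PySem.Set.mem_update, List.mem_cons]
    constructor
    · rintro ((h | h) | h)
      · exact Or.inl h
      · exact Or.inr ⟨w, Or.inl rfl, h⟩
      · rcases h with ⟨u, hu, hy⟩; exact Or.inr ⟨u, Or.inr hu, hy⟩
    · rintro (h | ⟨u, (rfl | hu), hy⟩)
      · exact Or.inl (Or.inl h)
      · exact Or.inl (Or.inr hy)
      · exact Or.inr ⟨u, hu, hy⟩

theorem mask_take_eq (n : Nat) (m : List Nat) (a : List Char) :
    pvMaskWord n m (a.take n) = pvMaskWord n m a := by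
  unfold pvMaskWord
  refine List.map_congr_left ?_
  intro k hk
  have hk' := List.mem_range.mp hk
  by_cases hkm : k ∈ m
  · simp [hkm]
  · simp [hkm, List.getD, hk']

-- the two per-query predicates agree
theorem pred_eq (n : Nat) (dictionary : List String) (q : List Char) :
    (dictionary.any (fun j => pvMismLT3 n q j.toList))
      = !(PySem.Set.isdisjoint (pvSigs n q)
            (dictionary.foldl (fun s w => PySem.Set.update s (pvSigs n w.toList)) PySem.Set.empty)) := by
  rw [Bool.eq_iff_iff, List.any_eq_true, Bool.not_eq_eq_eq_not, Bool.not_true,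
      ← Bool.not_eq_true, PySem.Set.isdisjoint_iff]
  push Not
  constructor
  · rintro ⟨j, hj, hlt⟩
    have hlt' := of_decide_eq_true hlt
    rcases (pvMism_iff_mask n q j.toList).mp hlt' with ⟨m, hm, heq⟩
    refine ⟨(m, pvMaskWord n m (q.take n)), ?_, ?_⟩
    · unfold pvSigs
      rw [PySem.Set.mem_ofList]
      exact List.mem_map.mpr ⟨m, hm, rfl⟩
    · rw [mem_dictSigs]
      refine Or.inr ⟨j, hj, ?_⟩
      unfold pvSigs
      rw [PySem.Set.mem_ofList]
      refine List.mem_map.mpr ⟨m, hm, ?_⟩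
      rw [Prod.mk.injEq]
      exact ⟨rfl, by rw [mask_take_eq, mask_take_eq, heq]⟩
  · rintro ⟨y, hy, hyd⟩
    rw [mem_dictSigs] at hyd
    rcases hyd with h | ⟨w, hw, hyw⟩
    · simp [PySem.Set.empty] at h
    · unfold pvSigs at hy hyw
      rw [PySem.Set.mem_ofList] at hy hyw
      rcases List.mem_map.mp hy with ⟨m, hm, rfl⟩
      rcases List.mem_map.mp hyw with ⟨m', hm', hEq⟩
      rw [Prod.mk.injEq] at hEq
      obtain ⟨hmm, hmask⟩ := hEq
      subst hmm
      refine ⟨w, hw, decide_eq_true ?_⟩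
      refine (pvMism_iff_mask n q w.toList).mpr ⟨m', hm', ?_⟩
      rw [← mask_take_eq, ← mask_take_eq (a := w.toList)]
      exact hmask.symm

-- ===== VERDICT (by name: the statement is the Claim_ definition above) =====
theorem solution_1703_2_spec : Claim_equal_solution_1703_2 := by
  intro queries dictionary _ _
  unfold Spec_solution_1703_2 solution_1703_2 solution_1703_2_alt
  rw [PySem.List.foldl_append_if_eq_filter]
  rw [List.nil_append]
  refine List.filter_congr ?_
  intro q hq
  exact pred_eq _ dictionary q.toList
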